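-- pv_equiv track=rewrite | github.com/austinzmchen/PythonAlgorithms | Educative_Code_Interviews/13_BitwiseXOR/3_ComplementOfBase10Number.py | calculate_bitwise_complement
-- ===== SOURCE A (Python) =====
-- def calculate_bitwise_complement(n):
--   m = n
--   count = 0
--   while m != 0:
--     m = m >> 1
--     count += 1
--
--   all_ones = (1 << count) - 1
--   return all_ones ^ n
-- ===== SOURCE B (Python) =====
-- def calculate_bitwise_complement(n):
--   # Recursive decomposition: the complement of n is its flipped low bit
--   # plus twice the complement of n >> 1; no bit counting, no mask, no XOR.
--   if n == 0:
--     return 0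
--   return (1 - (n & 1)) + 2 * calculate_bitwise_complement(n >> 1)
-- ===== Notes on version B (the rewrite author's own statement) =====
-- stated objective: alternative
-- what changed: Replaces A's two-phase iteration (a while loop counting bits, then XOR with an all-ones mask) by a single structural recursion on the bits: complement(n) = (1 - (n&1)) + 2*complement(n >> 1), with no counter, mask or XOR.
import Mathlib
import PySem

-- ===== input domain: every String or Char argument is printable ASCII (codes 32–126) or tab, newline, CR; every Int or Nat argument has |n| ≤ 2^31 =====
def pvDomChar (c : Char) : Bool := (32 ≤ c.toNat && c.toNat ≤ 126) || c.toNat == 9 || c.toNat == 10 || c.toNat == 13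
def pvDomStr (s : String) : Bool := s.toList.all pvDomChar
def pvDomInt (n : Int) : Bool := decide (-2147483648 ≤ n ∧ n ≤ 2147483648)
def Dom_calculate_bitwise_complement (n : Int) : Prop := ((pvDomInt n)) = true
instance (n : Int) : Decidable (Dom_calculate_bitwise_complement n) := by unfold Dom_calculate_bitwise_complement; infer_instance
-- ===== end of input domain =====

-- B replaces A's two phases (count bits, then XOR with the all-ones mask) by a
-- structural recursion on the bits: complement(n) = (1-(n&1)) + 2*complement(n>>1).


-- Python's 'm >> 1' (arithmetic shift) is floor division by 2.
theorem pvShrOne (m : Int) : m >>> (1:Nat) = PySem.Int.floordiv m 2 := by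
  cases m with
  | ofNat k => simp [PySem.Int.floordiv, Int.shiftRight_eq_div_pow, Int.fdiv_eq_ediv]
  | negSucc k => rfl

-- ===== PORT A =====
-- the 'while m != 0' bit-counting loop; for m < 0 Python loops forever (unreachable under Pre_)
def pvCountA (m : Int) (count : Nat) : Nat :=
  if m = 0 then count
  else if 0 < m then pvCountA (m >>> (1:Nat)) (count + 1)
  else count
termination_by m.toNat
decreasing_by
  rw [pvShrOne, PySem.Int.floordiv_eq_ediv_of_pos (by omega)]; omega

def calculate_bitwise_complement (n : Int) : Int :=
  let count := pvCountA n 0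
  let all_ones : Int := (1 <<< count) - 1
  PySem.Int.bxor all_ones n

-- ===== PORT B =====
-- structural recursion of Source B; for n < 0 Python recurses forever (unreachable under Pre_)
def calculate_bitwise_complement_alt (n : Int) : Int :=
  if h : n = 0 then 0
  else if h2 : 0 < n then
    (1 - PySem.Int.band n 1) + 2 * calculate_bitwise_complement_alt (n >>> (1:Nat))
  else 0
termination_by n.toNat
decreasing_by
  rw [pvShrOne, PySem.Int.floordiv_eq_ediv_of_pos (by omega)]; omega

-- ===== PRECONDITION & SPEC =====
-- Pre_ excludes negative n: there A's 'while m != 0' loop never terminates (arithmetic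
-- right shift keeps a negative number negative) and B's recursion never bottoms out.
def Pre_calculate_bitwise_complement (n : Int) : Prop := 0 ≤ n
instance (n : Int) : Decidable (Pre_calculate_bitwise_complement n) := by unfold Pre_calculate_bitwise_complement; infer_instance
def pvWitness_calculate_bitwise_complement : Int := 10

def Spec_calculate_bitwise_complement (n : Int) (out : Int) : Prop := out = calculate_bitwise_complement_alt n
instance (n : Int) (out : Int) : Decidable (Spec_calculate_bitwise_complement n out) := by unfold Spec_calculate_bitwise_complement; infer_instance

-- ===== CLAIM =====
def Claim_equal_calculate_bitwise_complement : Prop := ∀ (n : Int), Dom_calculate_bitwise_complement n → Pre_calculate_bitwise_complement n → Spec_calculate_bitwise_complement n (calculate_bitwise_complement n)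

-- ===== LEMMAS AND PROOFS =====

-- key Nat fact: XOR with the all-ones mask of width k is subtraction from the mask
theorem pvNatMask (k : Nat) : ∀ n < 2^k, (2^k - 1) ^^^ n = 2^k - 1 - n := by
  induction k with
  | zero => intro n hn; interval_cases n; decide
  | succ k ih =>
    intro n hn
    have h1 : 2^(k+1) - 1 = Nat.bit true (2^k - 1) := by
      simp [Nat.bit]; have := Nat.one_le_two_pow (n := k); omega
    have h2 : Nat.bit (n.testBit 0) (n >>> 1) = n := Nat.bit_testBit_zero_shiftRight_one n
    have h3 : n >>> 1 = n / 2 := Nat.shiftRight_one n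
    have h4 : (2^k - 1) ^^^ (n >>> 1) = 2^k - 1 - n / 2 := by
      rw [h3]; exact ih _ (by omega)
    rw [h1, ← h2, Nat.xor_bit, h4]
    have hb : n.testBit 0 = decide (n % 2 = 1) := by simp [Nat.testBit_zero]
    simp [Nat.bit, hb, h3]
    have := Nat.one_le_two_pow (n := k)
    rcases Nat.mod_two_eq_zero_or_one n with h | h <;> simp [h] <;> omega

-- A's counting loop computes count + bit_length m (for m >= 0).
theorem pvCountA_eq (m : Int) (h : 0 ≤ m) (count : Nat) :
    pvCountA m count = count + PySem.Int.bitLength m := by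
  rw [pvCountA]
  by_cases h0 : m = 0
  · simp [h0, PySem.Int.bitLength_zero]
  · have hpos : 0 < m := by omega
    have hfd : m >>> (1:Nat) = PySem.Int.floordiv m 2 := pvShrOne m
    have hge : 0 ≤ m >>> (1:Nat) := by
      rw [hfd, PySem.Int.floordiv_eq_ediv_of_pos (by omega)]; omega
    rw [if_neg h0, if_pos hpos, pvCountA_eq (m >>> (1:Nat)) hge (count + 1)]
    rw [hfd, PySem.Int.bitLength_of_pos hpos]
    omega
termination_by m.toNat
decreasing_by
  rw [pvShrOne, PySem.Int.floordiv_eq_ediv_of_pos (by omega)]; omega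

-- the all-ones XOR is subtraction from the mask, since n < 2^(bit_length n)
theorem pvMaskXor (n : Int) (h : 0 ≤ n) :
    PySem.Int.bxor ((1 <<< PySem.Int.bitLength n) - 1) n
      = (2 ^ PySem.Int.bitLength n - 1) - n := by
  have hsh : (((1 <<< PySem.Int.bitLength n : Nat)) : Int) = 2 ^ PySem.Int.bitLength n := by
    rw [Nat.one_shiftLeft]; push_cast; ring
  have hpow : (1:Int) ≤ 2 ^ PySem.Int.bitLength n := one_le_pow₀ (by norm_num)
  have hlt : n.toNat < 2 ^ PySem.Int.bitLength n := by
    have := PySem.Int.lt_two_pow_bitLength n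
    omega
  rw [hsh, PySem.Int.bxor_of_nonneg (by omega) h]
  have hc : ((2:Int) ^ PySem.Int.bitLength n) = ((2 ^ PySem.Int.bitLength n : Nat) : Int) := by
    push_cast; ring
  have ht : ((2:Int) ^ PySem.Int.bitLength n - 1).toNat = 2 ^ PySem.Int.bitLength n - 1 := by omega
  rw [ht, pvNatMask _ _ hlt]
  omega

-- B's recursion computes subtraction from the all-ones mask of width bit_length n.
theorem pvAlt_eq (n : Int) (h : 0 ≤ n) :
    calculate_bitwise_complement_alt n = (2 ^ PySem.Int.bitLength n - 1) - n := by
  rw [calculate_bitwise_complement_alt]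
  by_cases h0 : n = 0
  · simp [h0, PySem.Int.bitLength_zero]
  · have hpos : 0 < n := by omega
    have hfd : n >>> (1:Nat) = PySem.Int.floordiv n 2 := pvShrOne n
    have hge : 0 ≤ n >>> (1:Nat) := by
      rw [hfd, PySem.Int.floordiv_eq_ediv_of_pos (by omega)]; omega
    rw [dif_neg h0, dif_pos hpos, pvAlt_eq (n >>> (1:Nat)) hge]
    rw [hfd, PySem.Int.bitLength_of_pos hpos, PySem.Int.band_one]
    have hdm : PySem.Int.floordiv n 2 * 2 + PySem.Int.mod n 2 = n :=
      PySem.Int.floordiv_mul_add_mod n 2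
    set q := PySem.Int.floordiv n 2
    set s := PySem.Int.mod n 2
    calc (1 - s) + 2 * (2 ^ PySem.Int.bitLength q - 1 - q)
        = 2 ^ (PySem.Int.bitLength q + 1) - 1 - (q * 2 + s) := by rw [pow_succ]; ring
      _ = 2 ^ (PySem.Int.bitLength q + 1) - 1 - n := by rw [hdm]
termination_by n.toNat
decreasing_by
  rw [pvShrOne, PySem.Int.floordiv_eq_ediv_of_pos (by omega)]; omega

-- ===== VERDICT =====
theorem calculate_bitwise_complement_spec : Claim_equal_calculate_bitwise_complement := by
  intro n _ hpre
  unfold Spec_calculate_bitwise_complement calculate_bitwise_complement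
  rw [pvCountA_eq n hpre 0, pvAlt_eq n hpre]
  simpa using pvMaskXor n hpre
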